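-- pv_equiv track=rewrite | github.com/eddoasso/ISEL-CSM | Nao_meu/miguel_tavora/2º trabalho/final/tp2.py | descodifica
-- ===== SOURCE A (Python) =====
-- def descodifica (message, dicionario):
--     strfinal = ""
--     s = ""
--
--     for char in message:
--         s += char
--         for values in dicionario:
--             if s == str(values[1]):
--                 strfinal += str(values[0])
--                 s = ""
--                 break
--     return strfinal
-- ===== SOURCE B (Python) =====
-- def descodifica(message, dicionario):
--     # Build a trie of the code strings (first symbol wins), then walk the
--     # message through it, emitting at terminals and stopping on a dead edge.
--     root = {}
--     for values in dicionario:
--         node = root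
--         for ch in str(values[1]):
--             node = node.setdefault(ch, {})
--         if None not in node:
--             node[None] = str(values[0])
--     out = []
--     node = root
--     for ch in message:
--         nxt = node.get(ch)
--         if nxt is None:
--             break
--         node = nxt
--         sym = node.get(None)
--         if sym is not None:
--             out.append(sym)
--             node = root
--     return "".join(out)
-- ===== Notes on version B (the rewrite author's own statement) =====
-- stated objective: faster
-- what changed: B builds a prefix tree (trie) of the code strings once (first symbol wins per code) and decodes by walking the message through the trie character by character, emitting at terminal nodes and stopping at a dead edge, instead of rescanning the whole dictionary for every prefix of the message.
import Mathlib
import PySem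

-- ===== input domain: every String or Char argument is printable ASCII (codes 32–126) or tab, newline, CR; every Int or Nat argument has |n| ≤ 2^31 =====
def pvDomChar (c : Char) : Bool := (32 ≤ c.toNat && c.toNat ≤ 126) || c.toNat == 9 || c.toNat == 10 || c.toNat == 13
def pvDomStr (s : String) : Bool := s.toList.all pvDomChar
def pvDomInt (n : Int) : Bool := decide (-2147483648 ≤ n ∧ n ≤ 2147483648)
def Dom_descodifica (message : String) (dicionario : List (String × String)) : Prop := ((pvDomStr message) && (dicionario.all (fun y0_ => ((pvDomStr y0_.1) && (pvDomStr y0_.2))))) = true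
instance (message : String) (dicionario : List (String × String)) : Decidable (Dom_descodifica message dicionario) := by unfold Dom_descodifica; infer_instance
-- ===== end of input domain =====

-- B builds a prefix tree (trie) of the code strings once and walks the message
-- through it, instead of rescanning the whole dictionary for every prefix (objective: faster).

-- ===== PORT A =====
-- inner 'for values in dicionario: if s == str(values[1]): … break' (str() is identity on strings)
def pvInnerA (s : String) : List (String × String) → Option String
  | [] => none
  | values :: rest => if s == values.2 then some values.1 else pvInnerA s rest

-- one iteration of A's outer loop: state = (strfinal, s)
def pvStepA (dicionario : List (String × String)) (st : String × String) (char : Char) : String × String :=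
  let s := st.2.push char
  match pvInnerA s dicionario with
  | some sym => (st.1 ++ sym, "")
  | none => (st.1, s)

def descodifica (message : String) (dicionario : List (String × String)) : String :=
  (message.toList.foldl (pvStepA dicionario) ("", "")).1

-- ===== PORT B =====
-- a trie node: optional terminal symbol (Python's None key, first-wins) and
-- the child edges in insertion order (a mutual pair instead of a nested inductive)
mutual
inductive PvTrie where
  | node : Option String → PvKids → PvTrie
deriving DecidableEq, Repr
inductive PvKids where
  | nil : PvKids
  | cons : Char → PvTrie → PvKids → PvKids
deriving DecidableEq, Repr
end

-- node.get(ch) on the child dict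
def pvChildGet : PvKids → Char → Option PvTrie
  | PvKids.nil, _ => none
  | PvKids.cons c t rest, d => if d = c then some t else pvChildGet rest d

-- writing a child back (dict assignment: overwrite in place, else append)
def pvChildSet : PvKids → Char → PvTrie → PvKids
  | PvKids.nil, d, u => PvKids.cons d u PvKids.nil
  | PvKids.cons c t rest, d, u => if d = c then PvKids.cons c u rest else PvKids.cons c t (pvChildSet rest d u)

-- 'node = root; for ch in code: node = node.setdefault(ch, {}); if None not in node: node[None] = sym'
def pvInsert : PvTrie → List Char → String → PvTrie
  | PvTrie.node tm kids, [], sym => PvTrie.node (match tm with | none => some sym | some t => some t) kids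
  | PvTrie.node tm kids, c :: cs, sym =>
    let child := (pvChildGet kids c).getD (PvTrie.node none PvKids.nil)
    PvTrie.node tm (pvChildSet kids c (pvInsert child cs sym))

def pvBuild (dicionario : List (String × String)) : PvTrie :=
  dicionario.foldl (fun t values => pvInsert t values.2.toList values.1) (PvTrie.node none PvKids.nil)

def pvKidsOf : PvTrie → PvKids | PvTrie.node _ kids => kids
def pvTermOf : PvTrie → Option String | PvTrie.node tm _ => tm

-- 'node = root; for ch in message: …' — emit at terminals, stop on a missing edge
def pvWalk (root : PvTrie) : PvTrie → List Char → List String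
  | _, [] => []
  | cur, c :: rest =>
    match pvChildGet (pvKidsOf cur) c with
    | none => []
    | some nxt =>
      match pvTermOf nxt with
      | some sym => sym :: pvWalk root root rest
      | none => pvWalk root nxt rest

def descodifica_alt (message : String) (dicionario : List (String × String)) : String :=
  String.join (pvWalk (pvBuild dicionario) (pvBuild dicionario) message.toList)

-- ===== PRECONDITION & SPEC =====
def Spec_descodifica (message : String) (dicionario : List (String × String)) (out : String) : Prop := out = descodifica_alt message dicionario
instance (message : String) (dicionario : List (String × String)) (out : String) : Decidable (Spec_descodifica message dicionario out) := by unfold Spec_descodifica; infer_instance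

-- ===== CLAIM =====
def Claim_equal_descodifica : Prop := ∀ (message : String) (dicionario : List (String × String)), Dom_descodifica message dicionario → Spec_descodifica message dicionario (descodifica message dicionario)

-- ===== LEMMAS AND PROOFS =====

-- descending in the trie along a path
def pvFind : PvTrie → List Char → Option PvTrie
  | t, [] => some t
  | t, c :: cs =>
    match pvChildGet (pvKidsOf t) c with
    | none => none
    | some t' => pvFind t' cs

-- terminal symbol stored at a path
def pvTermAt (t : PvTrie) (cs : List Char) : Option String :=
  (pvFind t cs).bind pvTermOf

theorem pvChildGet_set (c d : Char) (u : PvTrie) :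
    (ks : PvKids) → pvChildGet (pvChildSet ks c u) d = if d = c then some u else pvChildGet ks d
  | PvKids.nil => by
    by_cases h : d = c <;> simp [pvChildSet, pvChildGet, h]
  | PvKids.cons c' t rest => by
    by_cases hc : c = c'
    · subst hc
      by_cases h : d = c <;> simp [pvChildSet, pvChildGet, h]
    · by_cases h : d = c'
      · subst h
        simp [pvChildSet, pvChildGet, hc, Ne.symm hc]
      · simp [pvChildSet, pvChildGet, hc, h, pvChildGet_set c d u rest]

theorem pvTermAt_empty (cs : List Char) : pvTermAt (PvTrie.node none PvKids.nil) cs = none := by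
  cases cs <;> simp [pvTermAt, pvFind, pvTermOf, pvKidsOf, pvChildGet]

-- one unfolding step of pvTermAt at a node
theorem pvTermAt_cons (tm : Option String) (kids : PvKids) (d : Char) (ds : List Char) :
    pvTermAt (PvTrie.node tm kids) (d :: ds)
      = match pvChildGet kids d with
        | none => none
        | some t' => pvTermAt t' ds := by
  cases hg : pvChildGet kids d <;> simp [pvTermAt, pvFind, pvKidsOf, hg]

-- L1: inserting a code touches exactly its own path's terminal, first-wins
theorem pvTermAt_insert (cs : List Char) (t : PvTrie) (sym : String) (ds : List Char) :
    pvTermAt (pvInsert t cs sym) ds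
      = if ds = cs then (pvTermAt t ds).or (some sym) else pvTermAt t ds := by
  induction cs generalizing t ds with
  | nil =>
    obtain ⟨tm, kids⟩ := t
    cases ds with
    | nil => cases tm <;> simp [pvInsert, pvTermAt, pvFind, pvTermOf, Option.or]
    | cons d ds' => simp [pvInsert, pvTermAt_cons]
  | cons c cs' ih =>
    obtain ⟨tm, kids⟩ := t
    cases ds with
    | nil => simp [pvInsert, pvTermAt, pvFind, pvTermOf]
    | cons d ds' =>
      rw [pvInsert, pvTermAt_cons, pvTermAt_cons]
      simp only [pvChildGet_set]
      by_cases hd : d = c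
      · subst hd
        rw [if_pos rfl]
        cases hg : pvChildGet kids d with
        | none =>
          simp only [Option.getD]
          rw [ih]
          by_cases he : ds' = cs'
          · subst he; simp [pvTermAt_empty, Option.or]
          · simp [he, pvTermAt_empty]
        | some child =>
          simp only [Option.getD]
          rw [ih]
          by_cases he : ds' = cs'
          · subst he; simp
          · simp [he]
      · have hne : (d :: ds') ≠ (c :: cs') := by simp [hd]
        simp [hd, hne]

-- L2: the built trie's terminals answer exactly A's first-match scan
theorem pvBuild_aux (l : List (String × String)) (t : PvTrie) (s : String) :
    pvTermAt (l.foldl (fun t values => pvInsert t values.2.toList values.1) t) s.toList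
      = (pvTermAt t s.toList).or (pvInnerA s l) := by
  induction l generalizing t with
  | nil => cases h : pvTermAt t s.toList <;> simp [pvInnerA, Option.or, h]
  | cons p rest ih =>
    simp only [List.foldl_cons, ih, pvInnerA, pvTermAt_insert]
    by_cases hs : s = p.2
    · subst hs
      simp only [beq_self_eq_true, if_true]
      cases pvTermAt t p.2.toList <;> simp [Option.or]
    · have hne : s.toList ≠ p.2.toList := fun h => hs (String.toList_inj.mp h)
      simp [hne, hs]

theorem pvTermAt_build (dicionario : List (String × String)) (s : String) :
    pvTermAt (pvBuild dicionario) s.toList = pvInnerA s dicionario := by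
  unfold pvBuild
  rw [pvBuild_aux, pvTermAt_empty]
  simp [Option.or]

-- descending distributes over path concatenation
theorem pvFind_append (t : PvTrie) (cs ds : List Char) :
    pvFind t (cs ++ ds) = (pvFind t cs).bind (fun u => pvFind u ds) := by
  induction cs generalizing t with
  | nil => simp [pvFind]
  | cons c cs' ih =>
    simp only [List.cons_append, pvFind]
    cases pvChildGet (pvKidsOf t) c <;> simp [ih]

-- once the walk falls off the trie, A's loop never emits again
theorem pvStuck (dicionario : List (String × String)) (chars : List Char) (acc s : String)
    (h : pvFind (pvBuild dicionario) s.toList = none) :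
    (chars.foldl (pvStepA dicionario) (acc, s)).1 = acc := by
  induction chars generalizing s with
  | nil => rfl
  | cons c rest ih =>
    have hlist : (s.push c).toList = s.toList ++ [c] := String.toList_push ..
    have hf : pvFind (pvBuild dicionario) (s.push c).toList = none := by
      rw [hlist, pvFind_append, h]; rfl
    have hnone : pvInnerA (s.push c) dicionario = none := by
      rw [← pvTermAt_build, pvTermAt, hf]; rfl
    simp only [List.foldl_cons, pvStepA, hnone]
    exact ih _ hf

-- "".join distributes over cons
theorem pvJoin_foldl (l : List String) (a : String) :
    List.foldl (fun r s => r ++ s) a l = a ++ List.foldl (fun r s => r ++ s) "" l := by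
  induction l generalizing a with
  | nil => simp
  | cons x rest ih =>
    rw [List.foldl_cons, List.foldl_cons, ih (a ++ x), ih ("" ++ x)]
    simp [String.append_assoc]

theorem pvJoin_cons (x : String) (l : List String) :
    String.join (x :: l) = x ++ String.join l := by
  simp only [String.join, List.foldl_cons]
  rw [pvJoin_foldl]
  simp

-- main invariant: A's fold state s sits at the trie node B's walk is at
theorem pvMain_aux (dicionario : List (String × String)) (chars : List Char) (acc s : String)
    (cur : PvTrie) (hcur : pvFind (pvBuild dicionario) s.toList = some cur) :
    (chars.foldl (pvStepA dicionario) (acc, s)).1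
      = acc ++ String.join (pvWalk (pvBuild dicionario) cur chars) := by
  induction chars generalizing acc s cur with
  | nil => simp [pvWalk, String.join]
  | cons c rest ih =>
    have hlist : (s.push c).toList = s.toList ++ [c] := String.toList_push ..
    have hstep : pvFind (pvBuild dicionario) (s.push c).toList
        = pvChildGet (pvKidsOf cur) c := by
      rw [hlist, pvFind_append, hcur]
      cases hg : pvChildGet (pvKidsOf cur) c <;> simp [pvFind, hg]
    have hinner : pvInnerA (s.push c) dicionario
        = (pvChildGet (pvKidsOf cur) c).bind pvTermOf := by
      rw [← pvTermAt_build, pvTermAt, hstep]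
    simp only [List.foldl_cons, pvStepA, pvWalk]
    cases hg : pvChildGet (pvKidsOf cur) c with
    | none =>
      rw [hg] at hinner hstep
      simp only [hinner, Option.bind_none]
      rw [pvStuck dicionario rest acc _ hstep]
      simp [String.join]
    | some nxt =>
      rw [hg] at hinner hstep
      cases ht : pvTermOf nxt with
      | some sym =>
        simp only [hinner, Option.bind_some, ht]
        rw [ih (acc ++ sym) "" (pvBuild dicionario) (by simp [pvFind]), pvJoin_cons,
          ← String.append_assoc]
      | none =>
        simp only [hinner, Option.bind_some, ht]
        exact ih acc _ nxt hstep

theorem descodifica_eq (message : String) (dicionario : List (String × String)) :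
    descodifica message dicionario = descodifica_alt message dicionario := by
  unfold descodifica descodifica_alt
  rw [pvMain_aux dicionario message.toList "" "" (pvBuild dicionario) (by simp [pvFind])]
  simp

-- ===== VERDICT =====
theorem descodifica_spec : Claim_equal_descodifica := by
  intro message dicionario _
  unfold Spec_descodifica
  exact descodifica_eq message dicionario
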